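-- pv_equiv track=rewrite | github.com/cyb3ri0t/Data-Leak_Parser | data-leaked-analyzer-v5.py | find_similar_hashes
-- ===== SOURCE A (Python) =====
-- def find_similar_hashes(top_hashes, all_hashes, all_hash_counter):
--     similar_dict = {}
--     for top_hash in top_hashes:
--         top_hash_lower = top_hash.lower()
--         similar = {}
--         for candidate in all_hashes:
--             candidate_lower = candidate.lower()
--             for i in range(len(candidate_lower) - 3):
--                 substring = candidate_lower[i:i+4]
--                 if substring in top_hash_lower and candidate != top_hash:
--                     similar[candidate] = all_hash_counter.get(candidate, 0)
--                     break
--         similar_dict[top_hash] = similar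
--     return similar_dict
-- ===== SOURCE B (Python) =====
-- def find_similar_hashes(top_hashes, all_hashes, all_hash_counter):
--     # Inverted index: each 4-gram of a lowercased top hash -> the top hashes containing it.
--     index = {}
--     for top_hash in top_hashes:
--         tl = top_hash.lower()
--         for i in range(len(tl) - 3):
--             bucket = index.setdefault(tl[i:i+4], [])
--             if top_hash not in bucket:
--                 bucket.append(top_hash)
--     result = {top_hash: {} for top_hash in top_hashes}
--     for candidate in all_hashes:
--         cl = candidate.lower()
--         count = all_hash_counter.get(candidate, 0)
--         for i in range(len(cl) - 3):
--             for top_hash in index.get(cl[i:i+4], []):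
--                 if candidate != top_hash:
--                     result[top_hash][candidate] = count
--     return result
-- ===== Notes on version B (the rewrite author's own statement) =====
-- stated objective: faster
-- what changed: Replaces the nested top-hash x candidate substring scan by an inverted index from each 4-gram of a lowercased top hash to the top hashes containing it, built once; a single pass over all_hashes then looks each candidate's 4-grams up in the index.
import Mathlib
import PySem

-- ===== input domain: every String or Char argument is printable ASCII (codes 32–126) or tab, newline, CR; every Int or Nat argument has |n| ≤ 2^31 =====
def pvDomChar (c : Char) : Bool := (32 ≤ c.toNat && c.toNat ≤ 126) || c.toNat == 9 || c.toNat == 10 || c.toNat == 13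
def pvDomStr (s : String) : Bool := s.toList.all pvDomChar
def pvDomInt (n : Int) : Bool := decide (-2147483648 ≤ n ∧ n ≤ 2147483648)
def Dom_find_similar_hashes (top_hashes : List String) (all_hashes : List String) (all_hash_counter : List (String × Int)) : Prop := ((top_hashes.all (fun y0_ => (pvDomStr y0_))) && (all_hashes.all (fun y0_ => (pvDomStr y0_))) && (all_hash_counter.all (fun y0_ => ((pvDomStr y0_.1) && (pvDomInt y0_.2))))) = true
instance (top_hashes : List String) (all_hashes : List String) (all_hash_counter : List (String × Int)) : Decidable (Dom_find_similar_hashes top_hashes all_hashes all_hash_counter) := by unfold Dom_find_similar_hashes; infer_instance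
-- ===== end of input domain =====

-- B replaces A's nested top×candidate substring scan by an inverted 4-gram index over the
-- top hashes built once, then a single indexed pass over all_hashes (faster; same results).


-- ===== PORT A =====
-- inner 'for i in range(len(candidate_lower) - 3): … break' loop of A (break = stop at first hit)
def pvAInner (tl : String) (top cand cl : String) (cnt : Int) (idxs : List Int)
    (sim : PySem.Dict String Int) : PySem.Dict String Int :=
  match idxs with
  | [] => sim
  | i :: rest =>
    let substring := PySem.Str.slice cl (some i) (some (i + 4))
    if PySem.Str.isIn substring tl && cand != top then sim.insert cand cnt
    else pvAInner tl top cand cl cnt rest sim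

def find_similar_hashes (top_hashes : List String) (all_hashes : List String) (all_hash_counter : List (String × Int)) : List (String × List (String × Int)) :=
  (top_hashes.foldl (fun similar_dict top_hash =>
      let top_hash_lower := PySem.Str.lower top_hash
      let similar := all_hashes.foldl (fun similar candidate =>
          let candidate_lower := PySem.Str.lower candidate
          pvAInner top_hash_lower top_hash candidate candidate_lower
            ((PySem.Dict.mk all_hash_counter).getD candidate 0)
            (PySem.List.pyRange 0 (PySem.Str.len candidate_lower - 3) 1) similar)
        PySem.Dict.empty
      similar_dict.insert top_hash similar)
    PySem.Dict.empty).items.map (fun p => (p.1, p.2.items))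

-- ===== PORT B =====
-- inverted index: 4-gram of a lowercased top hash -> top hashes containing it
def pvBIndex (top_hashes : List String) : PySem.Dict String (List String) :=
  top_hashes.foldl (fun index top_hash =>
      let tl := PySem.Str.lower top_hash
      (PySem.List.pyRange 0 (PySem.Str.len tl - 3) 1).foldl (fun index i =>
          index.modify (PySem.Str.slice tl (some i) (some (i + 4))) []
            (fun bucket => if top_hash ∈ bucket then bucket else bucket ++ [top_hash]))
        index)
    PySem.Dict.empty

def find_similar_hashes_alt (top_hashes : List String) (all_hashes : List String) (all_hash_counter : List (String × Int)) : List (String × List (String × Int)) :=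
  let index := pvBIndex top_hashes
  let result0 := top_hashes.foldl
    (fun r top_hash => r.insert top_hash (PySem.Dict.empty : PySem.Dict String Int))
    PySem.Dict.empty
  let result := all_hashes.foldl (fun r candidate =>
      let cl := PySem.Str.lower candidate
      let count := (PySem.Dict.mk all_hash_counter).getD candidate 0
      (PySem.List.pyRange 0 (PySem.Str.len cl - 3) 1).foldl (fun r i =>
          (index.getD (PySem.Str.slice cl (some i) (some (i + 4))) []).foldl (fun r top_hash =>
              if candidate != top_hash then
                r.modify top_hash PySem.Dict.empty (fun d => d.insert candidate count)
              else r)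
            r)
        r)
    result0
  result.items.map (fun p => (p.1, p.2.items))

-- ===== PRECONDITION & SPEC =====
def Spec_find_similar_hashes (top_hashes : List String) (all_hashes : List String) (all_hash_counter : List (String × Int)) (out : List (String × List (String × Int))) : Prop := out = find_similar_hashes_alt top_hashes all_hashes all_hash_counter
instance (top_hashes : List String) (all_hashes : List String) (all_hash_counter : List (String × Int)) (out : List (String × List (String × Int))) : Decidable (Spec_find_similar_hashes top_hashes all_hashes all_hash_counter out) := by unfold Spec_find_similar_hashes; infer_instance

-- ===== CLAIM (what is proved, stated in full; the proofs are below) =====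
def Claim_equal_find_similar_hashes : Prop := ∀ (top_hashes : List String) (all_hashes : List String) (all_hash_counter : List (String × Int)), Dom_find_similar_hashes top_hashes all_hashes all_hash_counter → Spec_find_similar_hashes top_hashes all_hashes all_hash_counter (find_similar_hashes top_hashes all_hashes all_hash_counter)

-- ===== LEMMAS AND PROOFS =====

-- 'candidate matches top_hash': some 4-gram of the lowercased candidate occurs in the
-- lowercased top hash, and the (unlowered) strings differ
def pvHit (top cand : String) : Bool :=
  ((PySem.List.pyRange 0 (PySem.Str.len (PySem.Str.lower cand) - 3) 1).any (fun i =>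
      PySem.Str.isIn (PySem.Str.slice (PySem.Str.lower cand) (some i) (some (i + 4)))
        (PySem.Str.lower top))) && cand != top

-- the per-top inner dict both programs produce
def pvS (all_hashes : List String) (counter : List (String × Int)) (top : String) :
    PySem.Dict String Int :=
  all_hashes.foldl (fun sim cand =>
      if pvHit top cand then sim.insert cand ((PySem.Dict.mk counter).getD cand 0) else sim)
    PySem.Dict.empty

theorem pvAInner_eq (tl top cand cl : String) (cnt : Int) (idxs : List Int)
    (sim : PySem.Dict String Int) :
    pvAInner tl top cand cl cnt idxs sim =
      if (idxs.any fun i => PySem.Str.isIn (PySem.Str.slice cl (some i) (some (i + 4))) tl)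
          && cand != top then sim.insert cand cnt else sim := by
  induction idxs with
  | nil => simp [pvAInner]
  | cons i rest ih =>
    cases hi : PySem.Chars.isIn (PySem.List.slice cl.toList (some i) (some (i + 4))) tl.toList <;>
      cases hne : cand != top <;>
        simp [pvAInner, hi, hne, ih]

-- generic: a fold inserting (t, F t) over l, starting from keys s (each already at (t, F t))
theorem pvItems_foldl_insert (F : String → PySem.Dict String Int) (l : List String) :
    ∀ s : List String, s.Nodup →
      ((l.foldl (fun d t => d.insert t (F t))
          (PySem.Dict.mk (s.map (fun t => (t, F t)))))).items
        = (PySem.Set.update s l).map (fun t => (t, F t)) := by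
  induction l with
  | nil => intro s _; simp [PySem.Set.update]
  | cons t l ih =>
    intro s hnd
    have hupd : PySem.Set.update s (t :: l) = PySem.Set.update (PySem.Set.add s t) l := rfl
    have hcont : (PySem.Dict.mk (s.map fun x => (x, F x))).contains t = decide (t ∈ s) := by
      rw [Bool.eq_iff_iff]
      simp [PySem.Dict.contains, List.any_map, Function.comp_def]
    by_cases ht : t ∈ s
    · have hins : (PySem.Dict.mk (s.map fun x => (x, F x))).insert t (F t)
          = PySem.Dict.mk (s.map fun x => (x, F x)) := by
        apply PySem.Dict.ext
        rw [PySem.Dict.items_insert_of_contains _ _ (by simp [hcont, ht])]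
        show List.map _ (s.map fun x => (x, F x)) = _
        rw [List.map_map]
        apply List.map_congr_left
        intro x _
        by_cases hx : x = t <;> simp [hx]
      have hadd : PySem.Set.add s t = s := by
        simp [PySem.Set.add, PySem.Set.contains, ht]
      rw [List.foldl_cons, hins, ih s hnd, hupd, hadd]
    · have hins : (PySem.Dict.mk (s.map fun x => (x, F x))).insert t (F t)
          = PySem.Dict.mk ((s ++ [t]).map fun x => (x, F x)) := by
        apply PySem.Dict.ext
        rw [PySem.Dict.items_insert_of_not_contains _ _ (by simp [hcont, ht])]
        simp
      have hadd : PySem.Set.add s t = s ++ [t] := by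
        simp [PySem.Set.add, PySem.Set.contains, ht]
      rw [List.foldl_cons, hins, ih (s ++ [t]) (by simp [List.nodup_append, hnd]; exact fun a ha h => ht (h ▸ ha)),
        hupd, hadd]

theorem find_similar_hashes_items (top_hashes all_hashes : List String)
    (counter : List (String × Int)) :
    find_similar_hashes top_hashes all_hashes counter
      = (PySem.Set.ofList top_hashes).map
          (fun t => (t, (pvS all_hashes counter t).items)) := by
  unfold find_similar_hashes
  have hstep : ∀ top : String, (fun (similar : PySem.Dict String Int) (candidate : String) =>
        pvAInner (PySem.Str.lower top) top candidate (PySem.Str.lower candidate)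
          ((PySem.Dict.mk counter).getD candidate 0)
          (PySem.List.pyRange 0 (PySem.Str.len (PySem.Str.lower candidate) - 3) 1) similar)
      = fun (sim : PySem.Dict String Int) (cand : String) =>
          if pvHit top cand then sim.insert cand ((PySem.Dict.mk counter).getD cand 0) else sim := by
    intro top
    funext sim cand
    rw [pvAInner_eq]
    unfold pvHit
    rfl
  have hfun : (fun (sd : PySem.Dict String (PySem.Dict String Int)) (top_hash : String) =>
        let top_hash_lower := PySem.Str.lower top_hash
        let similar := all_hashes.foldl (fun similar candidate =>
            let candidate_lower := PySem.Str.lower candidate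
            pvAInner top_hash_lower top_hash candidate candidate_lower
              ((PySem.Dict.mk counter).getD candidate 0)
              (PySem.List.pyRange 0 (PySem.Str.len candidate_lower - 3) 1) similar)
          PySem.Dict.empty
        sd.insert top_hash similar)
      = fun sd top_hash => sd.insert top_hash (pvS all_hashes counter top_hash) := by
    funext sd top
    dsimp only
    rw [hstep top]
    rfl
  rw [hfun]
  rw [show (PySem.Dict.empty : PySem.Dict String (PySem.Dict String Int))
        = PySem.Dict.mk (([] : List String).map fun t => (t, pvS all_hashes counter t)) from rfl]
  rw [pvItems_foldl_insert (pvS all_hashes counter) top_hashes [] List.nodup_nil]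
  rw [show PySem.Set.update ([] : List String) top_hashes = PySem.Set.ofList top_hashes from rfl]
  rw [List.map_map]
  rfl

-- Dict.modify on a present key updates that entry in place
theorem pvModify_items (pairs : List (String × PySem.Dict String Int)) (t : String)
    (f : PySem.Dict String Int → PySem.Dict String Int)
    (hnd : (pairs.map Prod.fst).Nodup) (ht : t ∈ pairs.map Prod.fst) :
    ((PySem.Dict.mk pairs).modify t PySem.Dict.empty f).items
      = pairs.map (fun p => if p.1 = t then (p.1, f p.2) else p) := by
  have hc : (PySem.Dict.mk pairs).contains t = true := by
    rw [Bool.eq_iff_iff]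
    simp only [PySem.Dict.contains, List.any_eq_true, beq_iff_eq, iff_true]
    obtain ⟨p, hp, hpt⟩ := List.mem_map.1 ht
    exact ⟨p, hp, hpt⟩
  show ((PySem.Dict.mk pairs).insert t (f ((PySem.Dict.mk pairs).getD t PySem.Dict.empty))).items = _
  rw [PySem.Dict.items_insert_of_contains _ _ hc]
  apply List.map_congr_left
  intro p hp
  by_cases hpt : p.1 = t
  · have hv : (PySem.Dict.mk pairs).getD t PySem.Dict.empty = p.2 := by
      apply PySem.Dict.getD_of_mem_items
      · show (t, p.2) ∈ pairs
        rw [← hpt]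
        exact hp
      · exact hnd
    simp [hpt, hv]
  · simp [hpt]

-- the innermost 'for top_hash in bucket' loop of B, as a pointwise map on the entries
theorem pvBucketFold_items (c : String) (n : Int) (L : List String) :
    ∀ pairs : List (String × PySem.Dict String Int), (pairs.map Prod.fst).Nodup →
      (∀ x ∈ L, x ∈ pairs.map Prod.fst) →
      (L.foldl (fun r t => if c != t then
            r.modify t PySem.Dict.empty (fun d => d.insert c n) else r)
          (PySem.Dict.mk pairs)).items
        = pairs.map (fun p => if p.1 ∈ L ∧ p.1 ≠ c then (p.1, p.2.insert c n) else p) := by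
  induction L with
  | nil =>
    intro pairs _ _
    simp
  | cons t L ih =>
    intro pairs hnd hmem
    rw [List.foldl_cons]
    by_cases hct : c = t
    · rw [if_neg (by simp [hct])]
      rw [ih pairs hnd (fun x hx => hmem x (List.mem_cons_of_mem _ hx))]
      apply List.map_congr_left
      intro p _
      by_cases h1 : p.1 ∈ L ∧ p.1 ≠ c
      · rw [if_pos h1, if_pos ⟨List.mem_cons_of_mem _ h1.1, h1.2⟩]
      · rw [if_neg h1, if_neg (by
          rintro ⟨hmem', hne⟩
          rcases List.mem_cons.1 hmem' with h | h
          · exact hne (h.trans hct.symm)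
          · exact h1 ⟨h, hne⟩)]
    · rw [if_pos (by simp [hct])]
      have hstep : (PySem.Dict.mk pairs).modify t PySem.Dict.empty (fun d => d.insert c n)
          = PySem.Dict.mk (pairs.map (fun p => if p.1 = t then (p.1, p.2.insert c n) else p)) := by
        apply PySem.Dict.ext
        exact pvModify_items pairs t _ hnd (hmem t (List.mem_cons_self ..))
      rw [hstep]
      have hfst : (pairs.map (fun p => if p.1 = t then (p.1, p.2.insert c n) else p)).map Prod.fst
          = pairs.map Prod.fst := by
        rw [List.map_map]
        apply List.map_congr_left
        intro p _
        by_cases h : p.1 = t <;> simp [h]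
      rw [ih _ (by rw [hfst]; exact hnd)
        (fun x hx => by rw [hfst]; exact hmem x (List.mem_cons_of_mem _ hx))]
      rw [List.map_map]
      apply List.map_congr_left
      intro p _
      by_cases hpt : p.1 = t
      · by_cases hL : p.1 ∈ L ∧ p.1 ≠ c
        · simp only [Function.comp_apply, if_pos hpt]
          rw [if_pos (show (p.1 ∈ L ∧ p.1 ≠ c)  from hL),
            if_pos ⟨List.mem_cons_of_mem _ hL.1, hL.2⟩]
          simp [PySem.Dict.insert_insert_self]
        · simp only [Function.comp_apply, if_pos hpt]
          rw [if_neg (show ¬ (p.1 ∈ L ∧ p.1 ≠ c) from hL),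
            if_pos ⟨by rw [hpt]; exact List.mem_cons_self .., by rw [hpt]; exact fun h => hct h.symm⟩]
      · simp only [Function.comp_apply, if_neg hpt]
        by_cases hL : p.1 ∈ L ∧ p.1 ≠ c
        · rw [if_pos hL, if_pos ⟨List.mem_cons_of_mem _ hL.1, hL.2⟩]
        · rw [if_neg hL, if_neg (by
            rintro ⟨hmem', hne⟩
            rcases List.mem_cons.1 hmem' with h | h
            · exact hpt h
            · exact hL ⟨h, hne⟩)]

-- the 'for i in range(len(cl) - 3)' loop of B for one candidate, as a pointwise map
theorem pvCandFold_items (index : PySem.Dict String (List String)) (cl c : String) (n : Int)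
    (idxs : List Int) :
    ∀ pairs : List (String × PySem.Dict String Int), (pairs.map Prod.fst).Nodup →
      (∀ g x, x ∈ index.getD g [] → x ∈ pairs.map Prod.fst) →
      (idxs.foldl (fun r i =>
            (index.getD (PySem.Str.slice cl (some i) (some (i + 4))) []).foldl
              (fun r t => if c != t then
                  r.modify t PySem.Dict.empty (fun d => d.insert c n) else r) r)
          (PySem.Dict.mk pairs)).items
        = pairs.map (fun p =>
            if (∃ i ∈ idxs, p.1 ∈ index.getD (PySem.Str.slice cl (some i) (some (i + 4))) [])
                ∧ p.1 ≠ c then (p.1, p.2.insert c n) else p) := by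
  induction idxs with
  | nil =>
    intro pairs _ _
    simp
  | cons i idxs ih =>
    intro pairs hnd hmem
    rw [List.foldl_cons]
    have hstep : ((index.getD (PySem.Str.slice cl (some i) (some (i + 4))) []).foldl
          (fun r t => if c != t then
              r.modify t PySem.Dict.empty (fun d => d.insert c n) else r)
          (PySem.Dict.mk pairs))
        = PySem.Dict.mk (pairs.map (fun p =>
            if p.1 ∈ index.getD (PySem.Str.slice cl (some i) (some (i + 4))) [] ∧ p.1 ≠ c
            then (p.1, p.2.insert c n) else p)) := by
      apply PySem.Dict.ext
      exact pvBucketFold_items c n _ pairs hnd (fun x hx => hmem _ x hx)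
    rw [hstep]
    have hfst : (pairs.map (fun p =>
          if p.1 ∈ index.getD (PySem.Str.slice cl (some i) (some (i + 4))) [] ∧ p.1 ≠ c
          then (p.1, p.2.insert c n) else p)).map Prod.fst = pairs.map Prod.fst := by
      rw [List.map_map]
      apply List.map_congr_left
      intro p _
      by_cases h : p.1 ∈ index.getD (PySem.Str.slice cl (some i) (some (i + 4))) [] ∧ p.1 ≠ c <;>
        simp [h]
    rw [ih _ (by rw [hfst]; exact hnd) (fun g x hx => by rw [hfst]; exact hmem g x hx)]
    rw [List.map_map]
    apply List.map_congr_left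
    intro p _
    clear ih hstep hfst hnd hmem
    simp only [Function.comp_apply, List.mem_cons]
    by_cases hpc : p.1 = c <;>
      by_cases h1 : p.1 ∈ index.getD (PySem.Str.slice cl (some i) (some (i + 4))) [] <;>
        by_cases h2 : ∃ j ∈ idxs, p.1 ∈ index.getD (PySem.Str.slice cl (some j) (some (j + 4))) [] <;>
          split_ifs <;>
            simp_all [PySem.Dict.insert_insert_self] <;>
              tauto

-- membership in an index bucket after one top hash's gram loop
theorem pvGramFold_mem (top tlS : String) (idxs : List Int) :
    ∀ (idx : PySem.Dict String (List String)) (g x : String),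
      x ∈ ((idxs.foldl (fun idx i =>
            idx.modify (PySem.Str.slice tlS (some i) (some (i + 4))) []
              (fun b => if top ∈ b then b else b ++ [top])) idx).getD g [])
        ↔ x ∈ idx.getD g [] ∨
            (x = top ∧ ∃ i ∈ idxs, PySem.Str.slice tlS (some i) (some (i + 4)) = g) := by
  induction idxs with
  | nil => intro idx g x; simp
  | cons i rest ih =>
    intro idx g x
    rw [List.foldl_cons, ih]
    have hmod : (idx.modify (PySem.Str.slice tlS (some i) (some (i + 4))) []
          (fun b => if top ∈ b then b else b ++ [top])).getD g []
        = if g = PySem.Str.slice tlS (some i) (some (i + 4)) then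
            (if top ∈ idx.getD (PySem.Str.slice tlS (some i) (some (i + 4))) [] then
              idx.getD (PySem.Str.slice tlS (some i) (some (i + 4))) []
            else idx.getD (PySem.Str.slice tlS (some i) (some (i + 4))) [] ++ [top])
          else idx.getD g [] := by
      show (idx.insert _ _).getD g [] = _
      rw [PySem.Dict.getD_insert]
    rw [hmod]
    by_cases hg : g = PySem.Str.slice tlS (some i) (some (i + 4))
    · subst hg
      by_cases htop : top ∈ idx.getD (PySem.Str.slice tlS (some i) (some (i + 4))) []
      · rw [if_pos rfl, if_pos htop]
        simp only [List.mem_cons]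
        constructor
        · rintro (hx | hx)
          · exact Or.inl hx
          · exact Or.inr ⟨hx.1, hx.2.imp (fun j hj => ⟨Or.inr hj.1, hj.2⟩)⟩
        · rintro (hx | ⟨rfl, j, hj | hj, hs⟩)
          · exact Or.inl hx
          · exact Or.inl htop
          · exact Or.inr ⟨rfl, j, hj, hs⟩
      · rw [if_pos rfl, if_neg htop]
        simp only [List.mem_append, List.mem_cons, List.not_mem_nil, or_false]
        constructor
        · rintro ((hx | rfl) | hx)
          · exact Or.inl hx
          · exact Or.inr ⟨rfl, i, Or.inl rfl, rfl⟩
          · exact Or.inr ⟨hx.1, hx.2.imp (fun j hj => ⟨Or.inr hj.1, hj.2⟩)⟩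
        · rintro (hx | ⟨rfl, j, hj | hj, hs⟩)
          · exact Or.inl (Or.inl hx)
          · exact Or.inl (Or.inr rfl)
          · exact Or.inr ⟨rfl, j, hj, hs⟩
    · rw [if_neg hg]
      simp only [List.mem_cons]
      constructor
      · rintro (hx | hx)
        · exact Or.inl hx
        · exact Or.inr ⟨hx.1, hx.2.imp (fun j hj => ⟨Or.inr hj.1, hj.2⟩)⟩
      · rintro (hx | ⟨rfl, j, hj | hj, hs⟩)
        · exact Or.inl hx
        · exact absurd hs.symm (by subst hj; exact hg)
        · exact Or.inr ⟨rfl, j, hj, hs⟩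

-- index membership: x is in bucket g iff x is a top hash and g is a 4-gram of lower(x)
theorem pvBIndex_mem (top_hashes : List String) (g x : String) :
    x ∈ (pvBIndex top_hashes).getD g [] ↔
      x ∈ top_hashes ∧
        ∃ i ∈ PySem.List.pyRange 0 (PySem.Str.len (PySem.Str.lower x) - 3) 1,
          PySem.Str.slice (PySem.Str.lower x) (some i) (some (i + 4)) = g := by
  suffices h : ∀ (tops : List String) (idx : PySem.Dict String (List String)),
      x ∈ (tops.foldl (fun index top_hash =>
          let tl := PySem.Str.lower top_hash
          (PySem.List.pyRange 0 (PySem.Str.len tl - 3) 1).foldl (fun index i =>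
              index.modify (PySem.Str.slice tl (some i) (some (i + 4))) []
                (fun bucket => if top_hash ∈ bucket then bucket else bucket ++ [top_hash]))
            index)
        idx).getD g []
      ↔ x ∈ idx.getD g [] ∨
          (x ∈ tops ∧ ∃ i ∈ PySem.List.pyRange 0 (PySem.Str.len (PySem.Str.lower x) - 3) 1,
            PySem.Str.slice (PySem.Str.lower x) (some i) (some (i + 4)) = g) by
    unfold pvBIndex
    rw [h top_hashes PySem.Dict.empty]
    simp
  intro tops
  induction tops with
  | nil => intro idx; simp
  | cons t ts ih =>
    intro idx
    rw [List.foldl_cons]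
    dsimp only
    rw [ih, pvGramFold_mem]
    constructor
    · rintro ((hx | ⟨rfl, hi⟩) | ⟨hxts, hgr⟩)
      · exact Or.inl hx
      · exact Or.inr ⟨List.mem_cons_self .., hi⟩
      · exact Or.inr ⟨List.mem_cons_of_mem _ hxts, hgr⟩
    · rintro (hx | ⟨hmem, hgr⟩)
      · exact Or.inl (Or.inl hx)
      · rcases List.mem_cons.1 hmem with rfl | hts
        · exact Or.inl (Or.inr ⟨rfl, hgr⟩)
        · exact Or.inr ⟨hts, hgr⟩

-- a 4-char slice of cl occurs somewhere in tl iff it equals some 4-char slice of tl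
theorem pvGram_isIn (tl cl : List Char) (i : Int) (h0 : 0 ≤ i) (h4 : i < cl.length - 3) :
    (∃ j ∈ PySem.List.pyRange 0 ((tl.length : Int) - 3) 1,
        PySem.List.slice tl (some j) (some (j + 4)) = PySem.List.slice cl (some i) (some (i + 4)))
      ↔ PySem.Chars.isIn (PySem.List.slice cl (some i) (some (i + 4))) tl = true := by
  have hsl : PySem.List.slice cl (some i) (some (i + 4)) = (cl.drop i.toNat).take 4 := by
    rw [PySem.List.slice_toNat cl h0 (by omega)]
    congr 1
    omega
  have hlen4 : (PySem.List.slice cl (some i) (some (i + 4))).length = 4 := by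
    rw [hsl]
    rw [List.length_take, List.length_drop]
    omega
  constructor
  · rintro ⟨j, hj, hslice⟩
    rw [PySem.List.mem_pyRange_one] at hj
    rw [← hslice, PySem.Chars.isIn_iff_infix,
      PySem.List.slice_toNat tl hj.1 (by omega),
      show (j + 4).toNat - j.toNat = 4 by omega]
    exact ((List.take_prefix _ _).isInfix).trans ((List.drop_suffix _ _).isInfix)
  · intro hin
    rw [PySem.Chars.isIn_iff_infix] at hin
    obtain ⟨pre, suf, heq⟩ := hin
    have htl : tl.length = pre.length + 4 + suf.length := by
      rw [← heq]
      simp [hlen4]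
      omega
    refine ⟨(pre.length : Int), ?_, ?_⟩
    · rw [PySem.List.mem_pyRange_one]
      constructor
      · positivity
      · rw [htl]
        push_cast
        omega
    · rw [PySem.List.slice_toNat tl (by positivity) (by positivity),
        show ((pre.length : Int) + 4).toNat - (pre.length : Int).toNat = 4 by omega,
        show ((pre.length : Int)).toNat = pre.length by omega,
        ← heq, List.append_assoc, List.drop_left, List.take_left' hlen4]

-- the index lookup over a candidate's 4-grams finds a top hash iff A's match test fires
theorem pvHit_iff (tops : List String) (t c : String) (ht : t ∈ tops) :
    ((∃ i ∈ PySem.List.pyRange 0 (PySem.Str.len (PySem.Str.lower c) - 3) 1,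
        t ∈ (pvBIndex tops).getD (PySem.Str.slice (PySem.Str.lower c) (some i) (some (i + 4))) [])
      ∧ t ≠ c) ↔ pvHit t c = true := by
  unfold pvHit
  rw [Bool.and_eq_true, List.any_eq_true]
  have hmain : ∀ i, i ∈ PySem.List.pyRange 0 (PySem.Str.len (PySem.Str.lower c) - 3) 1 →
      (t ∈ (pvBIndex tops).getD
          (PySem.Str.slice (PySem.Str.lower c) (some i) (some (i + 4))) []
        ↔ PySem.Str.isIn (PySem.Str.slice (PySem.Str.lower c) (some i) (some (i + 4)))
            (PySem.Str.lower t) = true) := by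
    intro i hi
    rw [PySem.List.mem_pyRange_one] at hi
    have hi2 : i < ((PySem.Str.lower c).toList.length : Int) - 3 := by
      have := hi.2
      rw [PySem.Str.len_eq] at this
      exact this
    have hg := pvGram_isIn (PySem.Str.lower t).toList (PySem.Str.lower c).toList i hi.1 hi2
    rw [pvBIndex_mem]
    rw [PySem.Str.isIn_eq, PySem.Str.toList_slice, PySem.Chars.slice_eq_listSlice, ← hg]
    constructor
    · rintro ⟨_, j, hj, hsl⟩
      refine ⟨j, ?_, ?_⟩
      · rw [PySem.List.mem_pyRange_one] at hj ⊢
        rw [PySem.Str.len_eq] at hj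
        exact hj
      · simpa using congrArg String.toList hsl
    · rintro ⟨j, hj, hsl⟩
      refine ⟨ht, j, ?_, ?_⟩
      · rw [PySem.List.mem_pyRange_one] at hj ⊢
        rw [PySem.Str.len_eq]
        exact hj
      · apply String.toList_inj.mp
        simpa using hsl
  constructor
  · rintro ⟨⟨i, hi, hmem⟩, hne⟩
    exact ⟨⟨i, hi, (hmain i hi).1 hmem⟩, by simp [bne_iff_ne]; exact fun h => hne h.symm⟩
  · rintro ⟨⟨i, hi, hisin⟩, hne⟩
    refine ⟨⟨i, hi, (hmain i hi).2 hisin⟩, ?_⟩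
    simp only [bne_iff_ne] at hne
    exact fun h => hne h.symm

-- B's whole pass over all_hashes, entrywise
theorem pvBMain (top_hashes : List String) (counter : List (String × Int))
    (alls : List String) :
    ∀ G : String → PySem.Dict String Int,
      (alls.foldl (fun r candidate =>
          let cl := PySem.Str.lower candidate
          let count := (PySem.Dict.mk counter).getD candidate 0
          (PySem.List.pyRange 0 (PySem.Str.len cl - 3) 1).foldl (fun r i =>
              ((pvBIndex top_hashes).getD (PySem.Str.slice cl (some i) (some (i + 4))) []).foldl
                (fun r top_hash => if candidate != top_hash then
                    r.modify top_hash PySem.Dict.empty (fun d => d.insert candidate count)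
                  else r) r) r)
        (PySem.Dict.mk ((PySem.Set.ofList top_hashes).map (fun t => (t, G t))))).items
      = (PySem.Set.ofList top_hashes).map (fun t =>
          (t, alls.foldl (fun d c =>
              if pvHit t c then d.insert c ((PySem.Dict.mk counter).getD c 0) else d) (G t))) := by
  induction alls with
  | nil => intro G; simp
  | cons c alls ih =>
    intro G
    rw [List.foldl_cons]
    dsimp only
    have hfst : (((PySem.Set.ofList top_hashes).map (fun t => (t, G t))).map Prod.fst)
        = PySem.Set.ofList top_hashes := by
      rw [List.map_map]
      simp [Function.comp_def]
    have hstep : ((PySem.List.pyRange 0 (PySem.Str.len (PySem.Str.lower c) - 3) 1).foldl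
          (fun r i =>
            ((pvBIndex top_hashes).getD
                (PySem.Str.slice (PySem.Str.lower c) (some i) (some (i + 4))) []).foldl
              (fun r top_hash => if c != top_hash then
                  r.modify top_hash PySem.Dict.empty
                    (fun d => d.insert c ((PySem.Dict.mk counter).getD c 0))
                else r) r)
          (PySem.Dict.mk ((PySem.Set.ofList top_hashes).map (fun t => (t, G t)))))
        = PySem.Dict.mk (((PySem.Set.ofList top_hashes).map (fun t => (t, G t))).map (fun p =>
            if (∃ i ∈ PySem.List.pyRange 0 (PySem.Str.len (PySem.Str.lower c) - 3) 1,
                p.1 ∈ (pvBIndex top_hashes).getD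
                  (PySem.Str.slice (PySem.Str.lower c) (some i) (some (i + 4))) [])
                ∧ p.1 ≠ c
            then (p.1, p.2.insert c ((PySem.Dict.mk counter).getD c 0)) else p)) := by
      apply PySem.Dict.ext
      exact pvCandFold_items (pvBIndex top_hashes) (PySem.Str.lower c) c _ _ _
        (by rw [hfst]; exact PySem.Set.nodup_ofList top_hashes)
        (fun g x hx => by
          rw [hfst]
          exact (PySem.Set.mem_ofList top_hashes x).2 ((pvBIndex_mem top_hashes g x).1 hx).1)
    rw [hstep]
    have hmap : (((PySem.Set.ofList top_hashes).map (fun t => (t, G t))).map (fun p =>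
          if (∃ i ∈ PySem.List.pyRange 0 (PySem.Str.len (PySem.Str.lower c) - 3) 1,
              p.1 ∈ (pvBIndex top_hashes).getD
                (PySem.Str.slice (PySem.Str.lower c) (some i) (some (i + 4))) [])
              ∧ p.1 ≠ c
          then (p.1, p.2.insert c ((PySem.Dict.mk counter).getD c 0)) else p))
        = (PySem.Set.ofList top_hashes).map (fun t =>
            (t, if pvHit t c then (G t).insert c ((PySem.Dict.mk counter).getD c 0) else G t)) := by
      rw [List.map_map]
      apply List.map_congr_left
      intro t htmem
      have hiff := pvHit_iff top_hashes t c ((PySem.Set.mem_ofList top_hashes t).1 htmem)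
      by_cases hh : pvHit t c = true
      · rw [Function.comp_apply, if_pos (hiff.2 hh), if_pos hh]
      · rw [Function.comp_apply, if_neg (fun hcond => hh (hiff.1 hcond)), if_neg hh]
    rw [hmap, ih (fun t => if pvHit t c then (G t).insert c ((PySem.Dict.mk counter).getD c 0)
      else G t)]
    apply List.map_congr_left
    intro t _
    rw [List.foldl_cons]

theorem find_similar_hashes_alt_items (top_hashes all_hashes : List String)
    (counter : List (String × Int)) :
    find_similar_hashes_alt top_hashes all_hashes counter
      = (PySem.Set.ofList top_hashes).map
          (fun t => (t, (pvS all_hashes counter t).items)) := by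
  unfold find_similar_hashes_alt
  dsimp only
  have h0 : (top_hashes.foldl
        (fun r top_hash => r.insert top_hash (PySem.Dict.empty : PySem.Dict String Int))
        PySem.Dict.empty)
      = PySem.Dict.mk ((PySem.Set.ofList top_hashes).map
          (fun t => (t, (PySem.Dict.empty : PySem.Dict String Int)))) := by
    apply PySem.Dict.ext
    rw [show (PySem.Dict.empty : PySem.Dict String (PySem.Dict String Int))
          = PySem.Dict.mk (([] : List String).map fun t => (t, (PySem.Dict.empty : PySem.Dict String Int))) from rfl]
    rw [pvItems_foldl_insert (fun _ => PySem.Dict.empty) top_hashes [] List.nodup_nil]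
    rfl
  rw [h0, pvBMain top_hashes counter all_hashes (fun _ => PySem.Dict.empty), List.map_map]
  rfl

-- ===== VERDICT (by name: the statement is the Claim_ definition above) =====
theorem find_similar_hashes_spec : Claim_equal_find_similar_hashes := by
  intro tops alls counter _
  unfold Spec_find_similar_hashes
  rw [find_similar_hashes_items, find_similar_hashes_alt_items]
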